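-- pv_equiv track=rewrite | github.com/Anubhaw6557/crypto-system | ciphers/RsaEncryption.py | generate_private_key_exponent
-- ===== SOURCE A (Python) =====
-- def generate_private_key_exponent(p,q,public_key_exponent):
--     eu_n=(p-1)*(q-1)
--     x_1=1
--     x_2=0
--     y_1=0
--     y_2=1
--     a=public_key_exponent
--     while eu_n!=0:
--         c=a//eu_n
--         a_=a
--         a=eu_n
--         eu_n=a_%eu_n
--         x_1_=x_1
--         x_1=x_2
--         x_2=x_1_-c*x_2
--         y_1_=y_1
--         y_1=y_2
--         y_2=y_1_-c*y_2
--     return(x_1%((p-1)*(q-1)))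
-- ===== SOURCE B (Python) =====
-- def _egcd(a, b):
--     if b == 0:
--         return (a, 1, 0)
--     g, x, y = _egcd(b, a % b)
--     return (g, y, x - (a // b) * y)
--
-- def generate_private_key_exponent(p, q, public_key_exponent):
--     phi = (p - 1) * (q - 1)
--     g, x, y = _egcd(public_key_exponent, phi)
--     return x % phi
-- ===== Notes on version B (the rewrite author's own statement) =====
-- stated objective: alternative
-- what changed: Replaces A's six-variable iterative extended Euclid loop with the classic recursive egcd(a,b) helper returning (g,x,y), then takes x % phi; same O(log n) cost, different decomposition.
import Mathlib
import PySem

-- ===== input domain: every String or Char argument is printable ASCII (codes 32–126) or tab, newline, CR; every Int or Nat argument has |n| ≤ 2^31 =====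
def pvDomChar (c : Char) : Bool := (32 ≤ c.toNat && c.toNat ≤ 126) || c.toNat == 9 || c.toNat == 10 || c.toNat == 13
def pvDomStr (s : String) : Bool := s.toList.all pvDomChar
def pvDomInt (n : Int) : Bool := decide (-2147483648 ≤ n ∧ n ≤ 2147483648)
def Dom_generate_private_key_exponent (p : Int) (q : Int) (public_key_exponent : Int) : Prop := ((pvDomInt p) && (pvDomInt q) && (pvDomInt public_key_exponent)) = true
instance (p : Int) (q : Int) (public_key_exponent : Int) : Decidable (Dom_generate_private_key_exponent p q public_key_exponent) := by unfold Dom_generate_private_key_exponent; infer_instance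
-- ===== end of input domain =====

-- B replaces A's six-variable iterative extended Euclid with the classic recursive egcd helper
-- (alternative decomposition, same cost); both take the final modulo against (p-1)*(q-1).

-- termination measure for Python's '%' (sign of the divisor, |a % b| < |b| for b ≠ 0)
theorem pvModNatAbsLt (a b : Int) (hb : b ≠ 0) : (PySem.Int.mod a b).natAbs < b.natAbs := by
  rcases lt_or_gt_of_ne hb with h | h
  · have := PySem.Int.mod_neg_bounds a h
    omega
  · have h1 := PySem.Int.mod_nonneg a h
    have h2 := PySem.Int.mod_lt a h
    omega

-- ===== PORT A =====
-- the while loop: state (eu_n, a, x_1, x_2, y_1, y_2); returns the final x_1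
def pvLoopA (euN a x1 x2 y1 y2 : Int) : Int :=
  if h : euN = 0 then x1
  else
    let c := PySem.Int.floordiv a euN
    pvLoopA (PySem.Int.mod a euN) euN x2 (x1 - c * x2) y2 (y1 - c * y2)
termination_by euN.natAbs
decreasing_by exact pvModNatAbsLt a euN h

def generate_private_key_exponent (p : Int) (q : Int) (public_key_exponent : Int) : Int :=
  PySem.Int.mod (pvLoopA ((p - 1) * (q - 1)) public_key_exponent 1 0 0 1) ((p - 1) * (q - 1))

-- ===== PORT B =====
-- recursive extended Euclid: egcd a b = (g, x, y) with g = gcd, a*x + b*y = g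
def pvEgcd (a b : Int) : Int × Int × Int :=
  if h : b = 0 then (a, 1, 0)
  else
    let r := pvEgcd b (PySem.Int.mod a b)
    (r.1, r.2.2, r.2.1 - PySem.Int.floordiv a b * r.2.2)
termination_by b.natAbs
decreasing_by exact pvModNatAbsLt a b h

def generate_private_key_exponent_alt (p : Int) (q : Int) (public_key_exponent : Int) : Int :=
  let phi := (p - 1) * (q - 1)
  PySem.Int.mod (pvEgcd public_key_exponent phi).2.1 phi

-- ===== PRECONDITION & SPEC =====
-- Pre_ excludes (p-1)*(q-1) = 0, where both A and B hit '% 0' and raise ZeroDivisionError.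
def Pre_generate_private_key_exponent (p : Int) (q : Int) (public_key_exponent : Int) : Prop := (p - 1) * (q - 1) ≠ 0
instance (p : Int) (q : Int) (public_key_exponent : Int) : Decidable (Pre_generate_private_key_exponent p q public_key_exponent) := by unfold Pre_generate_private_key_exponent; infer_instance

def pvWitness_generate_private_key_exponent : Int × Int × Int := (11, 13, 7)

def Spec_generate_private_key_exponent (p : Int) (q : Int) (public_key_exponent : Int) (out : Int) : Prop := out = generate_private_key_exponent_alt p q public_key_exponent
instance (p : Int) (q : Int) (public_key_exponent : Int) (out : Int) : Decidable (Spec_generate_private_key_exponent p q public_key_exponent out) := by unfold Spec_generate_private_key_exponent; infer_instance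

-- ===== CLAIM (what is proved, stated in full; the proofs are below) =====
def Claim_equal_generate_private_key_exponent : Prop := ∀ (p : Int) (q : Int) (public_key_exponent : Int), Dom_generate_private_key_exponent p q public_key_exponent → Pre_generate_private_key_exponent p q public_key_exponent → Spec_generate_private_key_exponent p q public_key_exponent (generate_private_key_exponent p q public_key_exponent)

-- ===== LEMMAS AND PROOFS =====

-- loop invariant: the final x_1 of A's loop is the linear combination of the current
-- x_1, x_2 with the recursive egcd coefficients of (a, euN)
theorem pvLoopA_eq (n : Nat) (euN a x1 x2 y1 y2 : Int) (hn : euN.natAbs ≤ n) :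
    pvLoopA euN a x1 x2 y1 y2 = x1 * (pvEgcd a euN).2.1 + x2 * (pvEgcd a euN).2.2 := by
  induction n generalizing euN a x1 x2 y1 y2 with
  | zero =>
    have h0 : euN = 0 := by omega
    subst h0
    rw [pvLoopA, pvEgcd]
    simp
  | succ n ih =>
    by_cases h : euN = 0
    · subst h
      rw [pvLoopA, pvEgcd]
      simp
    · rw [pvLoopA, pvEgcd]
      simp only [h, dite_false]
      have hlt := pvModNatAbsLt a euN h
      rw [ih (PySem.Int.mod a euN) euN x2 (x1 - PySem.Int.floordiv a euN * x2) y2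
            (y1 - PySem.Int.floordiv a euN * y2) (by omega)]
      ring

-- ===== VERDICT (by name: the statement is the Claim_ definition above) =====
theorem generate_private_key_exponent_spec : Claim_equal_generate_private_key_exponent := by
  intro p q e _ _
  unfold Spec_generate_private_key_exponent generate_private_key_exponent generate_private_key_exponent_alt
  rw [pvLoopA_eq ((p - 1) * (q - 1)).natAbs]
  · ring_nf
  · exact le_refl _
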